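-- pv_equiv track=rewrite | github.com/Jerryora/Mahjong-with-Bots | game.py | is_ponponhu
-- ===== SOURCE A (Python) =====
-- from collections import Counter
--
-- def is_ponponhu(tiles):
--     """检查是否有4个刻子"""
--     # 统计每个牌的数量
--     tile_counts = Counter(tiles)
--     triplet_count = 0
--     pair_count = 0
--
--     # 统计每种牌的数量
--     for count in tile_counts.values():
--         if count == 3:
--             triplet_count += 1
--         elif count == 2:
--             pair_count += 1
--
--     # 如果有4个刻子并且有1个对子
--     return triplet_count == 4 and pair_count == 1
-- ===== SOURCE B (Python) =====
-- def _flush(run, triples, pairs):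
--     if run == 3:
--         triples += 1
--     elif run == 2:
--         pairs += 1
--     return triples, pairs
--
--
-- def is_ponponhu(tiles):
--     """检查是否有4个刻子"""
--     triples = pairs = 0
--     prev = None
--     run = 0
--     for t in sorted(tiles):
--         if t == prev:
--             run += 1
--         else:
--             triples, pairs = _flush(run, triples, pairs)
--             prev, run = t, 1
--     triples, pairs = _flush(run, triples, pairs)
--     return triples == 4 and pairs == 1
-- ===== Notes on version B (the rewrite author's own statement) =====
-- stated objective: alternative
-- what changed: Replaced the Counter hash-table tally with a sort-then-scan: B sorts a copy of the tiles and counts run lengths of equal consecutive elements in one pass, incrementing triples/pairs as each run ends.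
import Mathlib
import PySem

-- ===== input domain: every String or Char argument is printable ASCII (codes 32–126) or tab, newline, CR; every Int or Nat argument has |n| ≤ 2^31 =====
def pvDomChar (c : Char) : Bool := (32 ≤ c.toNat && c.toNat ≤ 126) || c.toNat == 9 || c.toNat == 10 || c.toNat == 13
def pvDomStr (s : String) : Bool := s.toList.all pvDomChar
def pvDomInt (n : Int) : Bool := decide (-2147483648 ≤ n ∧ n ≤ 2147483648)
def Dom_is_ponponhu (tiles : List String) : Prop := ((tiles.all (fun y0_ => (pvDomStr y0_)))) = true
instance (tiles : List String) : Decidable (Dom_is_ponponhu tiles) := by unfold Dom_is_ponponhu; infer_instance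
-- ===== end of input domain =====

-- B replaces A's Counter tally with sort + one run-length scan over consecutive equal elements (alternative decomposition, same results).

-- ===== PORT A =====
def is_ponponhu (tiles : List String) : Bool :=
  let tile_counts := PySem.Dict.counter tiles
  let tp := tile_counts.values.foldl
    (fun (tp : Int × Int) count =>
      if count == 3 then (tp.1 + 1, tp.2)
      else if count == 2 then (tp.1, tp.2 + 1)
      else tp) (0, 0)
  tp.1 == 4 && tp.2 == 1

-- ===== PORT B =====
-- helper _flush of Source B
def pvFlush (run triples pairs : Int) : Int × Int :=
  if run == 3 then (triples + 1, pairs)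
  else if run == 2 then (triples, pairs + 1)
  else (triples, pairs)

-- the for-loop of Source B as structural recursion; state (prev, run, triples, pairs)
def pvScan : List String → Option String → Int → Int → Int → Option String × Int × Int × Int
  | [], prev, run, triples, pairs => (prev, run, triples, pairs)
  | t :: rest, prev, run, triples, pairs =>
      if some t == prev then pvScan rest prev (run + 1) triples pairs
      else
        let tp := pvFlush run triples pairs
        pvScan rest (some t) 1 tp.1 tp.2

def is_ponponhu_alt (tiles : List String) : Bool :=
  match pvScan (PySem.List.sorted tiles (fun x => x) false) none 0 0 0 with
  | (_, run, triples, pairs) =>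
      let tp := pvFlush run triples pairs
      tp.1 == 4 && tp.2 == 1

-- ===== PRECONDITION & SPEC =====
def Spec_is_ponponhu (tiles : List String) (out : Bool) : Prop := out = is_ponponhu_alt tiles
instance (tiles : List String) (out : Bool) : Decidable (Spec_is_ponponhu tiles out) := by unfold Spec_is_ponponhu; infer_instance

-- ===== CLAIM (what is proved, stated in full; the proofs are below) =====
def Claim_equal_is_ponponhu : Prop := ∀ (tiles : List String), Dom_is_ponponhu tiles → Spec_is_ponponhu tiles (is_ponponhu tiles)

-- ===== LEMMAS AND PROOFS =====

-- number of distinct elements of l occurring exactly c times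
def pvCnt (c : Nat) (l : List String) : Nat := (PySem.Set.ofList l).countP (fun x => l.count x == c)

def pvFinish (st : Option String × Int × Int × Int) : Int × Int := pvFlush st.2.1 st.2.2.1 st.2.2.2

theorem pv_beq_cast4 (n : Nat) : ((n : Int) == 4) = (n == 4) := by
  rw [Bool.eq_iff_iff]
  simp only [beq_iff_eq]
  omega

theorem pv_beq_cast1 (n : Nat) : ((n : Int) == 1) = (n == 1) := by
  rw [Bool.eq_iff_iff]
  simp only [beq_iff_eq]
  omega

-- ---- A side: the Counter fold counts values equal to 3 and to 2 ----

theorem a_fold (tiles : List String) :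
    (PySem.Dict.counter tiles).values.foldl
      (fun (tp : Int × Int) count =>
        if count == 3 then (tp.1 + 1, tp.2)
        else if count == 2 then (tp.1, tp.2 + 1)
        else tp) ((0:Int), (0:Int)) = ((pvCnt 3 tiles : Int), (pvCnt 2 tiles : Int)) := by
  have hv : (PySem.Dict.counter tiles).values = (PySem.Set.ofList tiles).map (fun k => (tiles.count k : Int)) := by
    simp [PySem.Dict.values, PySem.Dict.items_counter, List.map_map]
  have hfg : (fun (tp : Int × Int) count =>
        if count == 3 then (tp.1 + 1, tp.2)
        else if count == 2 then (tp.1, tp.2 + 1)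
        else tp) = (fun (tp : Int × Int) (count : Int) =>
        ((fun a (c : Int) => if c == 3 then a + 1 else a) tp.1 count,
         (fun a (c : Int) => if c == 2 then a + 1 else a) tp.2 count)) := by
    funext tp c
    by_cases h3 : c = 3 <;> by_cases h2 : c = 2 <;> simp [h3, h2]
  simp only [hv, hfg]
  rw [PySem.List.foldl_prod_mk (f := fun a (c : Int) => if c == 3 then a + 1 else a)
       (g := fun a (c : Int) => if c == 2 then a + 1 else a)]
  simp only [PySem.List.foldl_beq_add_one, zero_add]
  have hc : ∀ (c : Nat), (((PySem.Set.ofList tiles).map (fun k => (tiles.count k : Int))).count (c : Int) : Int) = (pvCnt c tiles : Int) := by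
    intro c
    rw [List.count_eq_countP, List.countP_map]
    unfold pvCnt
    norm_cast
    apply List.countP_congr
    intro x _
    simp only [Function.comp, beq_iff_eq]
    constructor <;> intro h <;> omega
  have h3 := hc 3
  have h2 := hc 2
  push_cast at h3 h2 ⊢
  rw [h3, h2]

theorem a_char (tiles : List String) :
    is_ponponhu tiles = ((pvCnt 3 tiles == 4) && (pvCnt 2 tiles == 1)) := by
  unfold is_ponponhu
  simp only [a_fold, pv_beq_cast4, pv_beq_cast1]

-- ---- B side: the run-length scan over a sorted list computes the same tallies ----

theorem foldl_add_cons (u : List String) (s : List String) (x : String) (hx : x ∉ u) :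
    List.foldl PySem.Set.add (x :: s) u = x :: List.foldl PySem.Set.add s u := by
  induction u generalizing s with
  | nil => rfl
  | cons z zs ih =>
    have hzx : z ≠ x := by intro h; exact hx (by simp [h])
    have hstep : PySem.Set.add (x :: s) z = x :: PySem.Set.add s z := by
      simp [PySem.Set.add, PySem.Set.contains, hzx]
      split <;> simp
    rw [List.foldl_cons, hstep, List.foldl_cons]
    exact ih (PySem.Set.add s z) (fun h => hx (List.mem_cons_of_mem _ h))

theorem foldl_add_replicate (k : Nat) (x : String) (s : List String) (hx : x ∈ s) :
    List.foldl PySem.Set.add s (List.replicate k x) = s := by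
  induction k with
  | zero => rfl
  | succ n ih =>
    rw [List.replicate_succ, List.foldl_cons]
    have : PySem.Set.add s x = s := by simp [PySem.Set.add, PySem.Set.contains, hx]
    rw [this, ih]

theorem ofList_chunk (k : Nat) (x : String) (u : List String) (hx : x ∉ u) :
    PySem.Set.ofList (x :: (List.replicate k x ++ u)) = x :: PySem.Set.ofList u := by
  show List.foldl PySem.Set.add [] (x :: (List.replicate k x ++ u)) = _
  rw [List.foldl_cons]
  have h1 : PySem.Set.add [] x = [x] := by rfl
  rw [h1, List.foldl_append, foldl_add_replicate k x [x] (by simp)]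
  exact foldl_add_cons u [] x hx

theorem count_chunk_self (k : Nat) (x : String) (u : List String) (hx : x ∉ u) :
    (x :: (List.replicate k x ++ u)).count x = k + 1 := by
  simp [List.count_append, List.count_eq_zero.mpr hx]

theorem countP_chunk (c : Nat) (k : Nat) (x : String) (u : List String) (hx : x ∉ u) :
    pvCnt c (x :: (List.replicate k x ++ u)) = (if k + 1 = c then 1 else 0) + pvCnt c u := by
  unfold pvCnt
  rw [ofList_chunk k x u hx, List.countP_cons]
  have hcong : ∀ z ∈ PySem.Set.ofList u,
      ((x :: (List.replicate k x ++ u)).count z == c) = true ↔ (u.count z == c) = true := by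
    intro z hz
    have hzu : z ∈ u := (PySem.Set.mem_ofList u z).mp hz
    have hzx : z ≠ x := fun h => hx (h ▸ hzu)
    simp [List.count_append, List.count_replicate, Ne.symm hzx]
  rw [List.countP_congr hcong, count_chunk_self k x u hx]
  by_cases h : k + 1 = c <;> simp [h] <;> omega

theorem scan_replicate (k : Nat) (x : String) (t : List String) (run tr pr : Int) :
    pvScan (List.replicate k x ++ t) (some x) run tr pr = pvScan t (some x) (run + k) tr pr := by
  induction k generalizing run with
  | zero => simp
  | succ n ih =>
    rw [List.replicate_succ, List.cons_append]
    rw [pvScan]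
    simp only [BEq.rfl, if_pos]
    have harg : run + 1 + (n : Int) = run + ((n + 1 : Nat) : Int) := by push_cast; ring
    rw [ih (run + 1), harg]

theorem dropWhile_head_ne (t : List String) (x y : String) (v : List String)
    (h : t.dropWhile (· == x) = y :: v) : y ≠ x := by
  have hne : t.dropWhile (· == x) ≠ [] := by simp [h]
  have := List.head_dropWhile_not (p := fun z => z == x) (l := t) hne
  simp only [h, List.head_cons] at this
  simpa using this

theorem sorted_cons_decomp (x : String) (t : List String)
    (hpair : (x :: t).Pairwise (· ≤ ·)) :
    ∃ (k : Nat) (u : List String), t = List.replicate k x ++ u ∧ x ∉ u ∧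
      u.Pairwise (· ≤ ·) ∧ u.length ≤ t.length := by
  refine ⟨(t.takeWhile (· == x)).length, t.dropWhile (· == x), ?_, ?_, ?_, ?_⟩
  · conv_lhs => rw [← List.takeWhile_append_dropWhile (p := (· == x)) (l := t)]
    congr 1
    apply List.eq_replicate_of_mem
    intro b hb
    simpa using List.mem_takeWhile_imp hb
  · intro hmem
    obtain ⟨y, v, hcase⟩ : ∃ y v, t.dropWhile (· == x) = y :: v := by
      cases h : t.dropWhile (· == x) with
      | nil => rw [h] at hmem; cases hmem
      | cons a b => exact ⟨a, b, rfl⟩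
    have hyx := dropWhile_head_ne t x y v hcase
    have hxt : ∀ z ∈ t, x ≤ z := (List.pairwise_cons.mp hpair).1
    have hyt : y ∈ t := (List.dropWhile_sublist _).subset (by rw [hcase]; simp)
    have hxy : x < y := lt_of_le_of_ne (hxt y hyt) (Ne.symm hyx)
    have hupair : (y :: v).Pairwise (· ≤ ·) := by
      rw [← hcase]
      exact List.Pairwise.sublist (List.dropWhile_sublist _) (List.Pairwise.of_cons hpair)
    rw [hcase] at hmem
    rcases List.mem_cons.mp hmem with h | h
    · exact hyx h.symm
    · have : y ≤ x := (List.pairwise_cons.mp hupair).1 x h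
      exact absurd hxy (not_lt.mpr this)
  · exact List.Pairwise.sublist (List.dropWhile_sublist _) (List.Pairwise.of_cons hpair)
  · exact (List.dropWhile_sublist _).length_le

theorem scan_main : ∀ (n : Nat) (s : List String), s.length ≤ n → s.Pairwise (· ≤ ·) →
    ∀ (prev : Option String), (∀ z ∈ s, prev ≠ some z) → ∀ run tr pr,
    pvFinish (pvScan s prev run tr pr) =
      ((pvFlush run tr pr).1 + pvCnt 3 s, (pvFlush run tr pr).2 + pvCnt 2 s) := by
  intro n
  induction n with
  | zero =>
    intro s hs _ prev _ run tr pr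
    have : s = [] := List.length_eq_zero_iff.mp (Nat.le_zero.mp hs)
    subst this
    simp [pvScan, pvFinish, pvCnt, PySem.Set.ofList]
  | succ n ih =>
    intro s hs hpair prev hprev run tr pr
    match s, hs, hpair, hprev with
    | [], _, _, _ => simp [pvScan, pvFinish, pvCnt, PySem.Set.ofList]
    | x :: t, hs, hpair, hprev =>
      have hxprev : (some x == prev) = false := by
        have := hprev x (by simp)
        cases prev with
        | none => rfl
        | some p =>
          simp only [beq_eq_false_iff_ne]
          intro hcontra
          exact this (by rw [← hcontra])
      obtain ⟨k, u, ht, hxu, hupair, hlen⟩ := sorted_cons_decomp x t hpair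
      subst ht
      rw [pvScan, hxprev]
      simp only [Bool.false_eq_true, if_false]
      rw [scan_replicate k x u 1 _ _]
      have hulen : u.length ≤ n := by
        simp only [List.length_cons, List.length_append, List.length_replicate] at hs
        omega
      have hprev' : ∀ z ∈ u, (some x : Option String) ≠ some z := by
        intro z hz h
        rw [Option.some.injEq] at h
        exact hxu (h ▸ hz)
      rw [ih u hulen hupair (some x) hprev' _ _ _]
      rw [countP_chunk 3 k x u hxu, countP_chunk 2 k x u hxu]
      obtain ⟨a, b, hab⟩ : ∃ a b, pvFlush run tr pr = (a, b) := ⟨_, _, rfl⟩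
      rw [hab]
      have e3 : ((1 + (k:Int)) == 3) = decide (k + 1 = 3) := by
        by_cases h : k + 1 = 3 <;> simp [h] <;> omega
      have e2 : ((1 + (k:Int)) == 2) = decide (k + 1 = 2) := by
        by_cases h : k + 1 = 2 <;> simp [h] <;> omega
      simp only [pvFlush, e3, e2, decide_eq_true_eq]
      by_cases h3 : k + 1 = 3 <;> by_cases h2 : k + 1 = 2 <;>
        (simp [h3, h2]; try push_cast; try ring)

theorem pvCnt_perm (c : Nat) (s t : List String) (h : s.Perm t) : pvCnt c s = pvCnt c t := by
  unfold pvCnt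
  have hpred : (fun x => s.count x == c) = (fun x => t.count x == c) := by
    funext x; rw [h.count_eq]
  rw [hpred]
  exact List.Perm.countP_eq _
    ((List.perm_ext_iff_of_nodup (PySem.Set.nodup_ofList s) (PySem.Set.nodup_ofList t)).mpr
      (fun a => by
        rw [PySem.Set.mem_ofList s a, PySem.Set.mem_ofList t a]
        exact h.mem_iff))

theorem b_char (tiles : List String) :
    is_ponponhu_alt tiles = ((pvCnt 3 tiles == 4) && (pvCnt 2 tiles == 1)) := by
  unfold is_ponponhu_alt
  have hperm : (PySem.List.sorted tiles (fun x => x) false).Perm tiles :=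
    PySem.List.sorted_perm tiles (fun x => x) false
  have hpair : (PySem.List.sorted tiles (fun x => x) false).Pairwise (· ≤ ·) :=
    List.Pairwise.imp (fun h => h) (PySem.List.sorted_pairwise (xs := tiles) (key := fun x => x))
  have h := scan_main (PySem.List.sorted tiles (fun x => x) false).length
    (PySem.List.sorted tiles (fun x => x) false) le_rfl hpair none (by simp) 0 0 0
  rcases hst : pvScan (PySem.List.sorted tiles (fun x => x) false) none 0 0 0 with ⟨p, run, tr, pr⟩
  rw [hst] at h
  have h' : pvFlush run tr pr =
      ((pvCnt 3 (PySem.List.sorted tiles (fun x => x) false) : Int),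
       (pvCnt 2 (PySem.List.sorted tiles (fun x => x) false) : Int)) := by
    have hfin : pvFinish (p, run, tr, pr) = pvFlush run tr pr := rfl
    rw [hfin] at h
    simpa [pvFlush] using h
  show ((pvFlush run tr pr).1 == 4 && (pvFlush run tr pr).2 == 1) = _
  rw [h', pvCnt_perm 3 _ _ hperm, pvCnt_perm 2 _ _ hperm]
  simp only [pv_beq_cast4, pv_beq_cast1]

-- ===== VERDICT (by name: the statement is the Claim_ definition above) =====
theorem is_ponponhu_spec : Claim_equal_is_ponponhu := by
  intro tiles _
  unfold Spec_is_ponponhu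
  rw [a_char, b_char]
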